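-- pv_equiv track=rewrite | github.com/JoelDankert/Obs-Stream-Browser | start-stream.py | parse_allowed_hosts
-- ===== SOURCE A (Python) =====
-- def parse_allowed_hosts(raw_value: str):
--     raw_value = raw_value.strip()
--     if not raw_value:
--         return None
--
--     host_numbers = {1}
--     for token in raw_value.split():
--         try:
--             host = int(token)
--         except ValueError:
--             raise ValueError(f"Invalid host number: {token!r}") from None
--         if host < 1 or host > 254:
--             raise ValueError(f"Host number out of range 1-254: {host}")
--         host_numbers.add(host)
--     return sorted(host_numbers)
-- ===== SOURCE B (Python) =====
-- def _parse_host(token):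
--     try:
--         host = int(token)
--     except ValueError:
--         raise ValueError(f"Invalid host number: {token!r}") from None
--     if host < 1 or host > 254:
--         raise ValueError(f"Host number out of range 1-254: {host}")
--     return host
--
--
-- def _insert_sorted_unique(host, lst):
--     # insert host into the strictly increasing list lst, keeping it strictly increasing
--     if not lst or host < lst[0]:
--         return [host] + lst
--     if host == lst[0]:
--         return lst
--     return [lst[0]] + _insert_sorted_unique(host, lst[1:])
--
--
-- def parse_allowed_hosts(raw_value: str):
--     raw_value = raw_value.strip()
--     if not raw_value:
--         return None
--     result = [1]
--     for token in raw_value.split():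
--         result = _insert_sorted_unique(_parse_host(token), result)
--     return result
-- ===== Notes on version B (the rewrite author's own statement) =====
-- stated objective: alternative
-- what changed: B never builds a set and never calls sorted(): it maintains the result as a strictly increasing list from the start, inserting each parsed host in place via a recursive sorted-unique insertion (online insertion sort with dedup), keeping A's per-token parse/range checks.
import Mathlib
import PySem

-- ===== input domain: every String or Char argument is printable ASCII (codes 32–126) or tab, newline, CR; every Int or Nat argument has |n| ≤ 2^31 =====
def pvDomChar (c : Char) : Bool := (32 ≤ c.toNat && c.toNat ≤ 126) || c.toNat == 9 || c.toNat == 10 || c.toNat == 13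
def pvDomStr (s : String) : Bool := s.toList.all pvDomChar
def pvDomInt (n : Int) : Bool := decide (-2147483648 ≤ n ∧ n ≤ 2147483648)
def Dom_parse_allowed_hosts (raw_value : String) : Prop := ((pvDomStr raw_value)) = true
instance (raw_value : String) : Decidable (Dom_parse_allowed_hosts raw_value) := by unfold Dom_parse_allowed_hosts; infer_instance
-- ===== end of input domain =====

-- B drops A's set and final sorted() call: it keeps the result strictly increasing throughout via recursive sorted-unique insertion.

-- ===== PORT A =====
-- one loop iteration of A: int(token) (none = ValueError), range check (raise), set.add
def pvStepA (acc : Option (PySem.Set Int)) (token : String) : Option (PySem.Set Int) :=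
  match acc with
  | none => none
  | some s =>
    match PySem.Int.ofStr? token with
    | none => none          -- ValueError: invalid host number (excluded by Pre_)
    | some host =>
      if host < 1 ∨ host > 254 then none   -- ValueError: out of range (excluded by Pre_)
      else some (PySem.Set.add s host)

def parse_allowed_hosts (raw_value : String) : Option (List Int) :=
  let rv := PySem.Str.strip raw_value
  if rv = "" then none
  else
    match (PySem.Str.split₀ rv).foldl pvStepA (some (PySem.Set.ofList [(1:Int)])) with
    | none => none
    | some s => some (PySem.List.sorted s (fun x => x) false)

-- ===== PORT B =====
-- _insert_sorted_unique: insert host into a strictly increasing list, keeping it strictly increasing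
def pvInsSU (host : Int) : List Int → List Int
  | [] => [host]
  | x :: xs =>
    if host < x then host :: x :: xs
    else if host = x then x :: xs
    else x :: pvInsSU host xs

-- one loop iteration of B: same parse and range check, then sorted-unique insertion
def pvStepB (acc : Option (List Int)) (token : String) : Option (List Int) :=
  match acc with
  | none => none
  | some r =>
    match PySem.Int.ofStr? token with
    | none => none          -- ValueError: invalid host number (excluded by Pre_)
    | some host =>
      if host < 1 ∨ host > 254 then none   -- ValueError: out of range (excluded by Pre_)
      else some (pvInsSU host r)

def parse_allowed_hosts_alt (raw_value : String) : Option (List Int) :=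
  let rv := PySem.Str.strip raw_value
  if rv = "" then none
  else (PySem.Str.split₀ rv).foldl pvStepB (some [(1:Int)])

-- ===== PRECONDITION & SPEC =====
-- a token A accepts: parses as an int in 1..254
def pvGoodToken (t : String) : Bool :=
  match PySem.Int.ofStr? t with
  | none => false
  | some h => decide (1 ≤ h ∧ h ≤ 254)

-- Pre_ excludes exactly the inputs on which A raises ValueError (a token that is not an int, or out of range 1-254)
def Pre_parse_allowed_hosts (raw_value : String) : Prop :=
  ∀ t ∈ PySem.Str.split₀ (PySem.Str.strip raw_value), pvGoodToken t = true
instance (raw_value : String) : Decidable (Pre_parse_allowed_hosts raw_value) := by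
  unfold Pre_parse_allowed_hosts; infer_instance

def pvWitness_parse_allowed_hosts : String := "254 2 2 7"

def Spec_parse_allowed_hosts (raw_value : String) (out : Option (List Int)) : Prop := out = parse_allowed_hosts_alt raw_value
instance (raw_value : String) (out : Option (List Int)) : Decidable (Spec_parse_allowed_hosts raw_value out) := by unfold Spec_parse_allowed_hosts; infer_instance

-- ===== CLAIM (what is proved, stated in full; the proofs are below) =====
def Claim_equal_parse_allowed_hosts : Prop := ∀ (raw_value : String), Dom_parse_allowed_hosts raw_value → Pre_parse_allowed_hosts raw_value → Spec_parse_allowed_hosts raw_value (parse_allowed_hosts raw_value)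

-- ===== LEMMAS AND PROOFS =====

-- invariant linking A's set and B's strictly increasing list: same elements, r strictly sorted
def pvInv (s : PySem.Set Int) (r : List Int) : Prop :=
  s.Nodup ∧ r.Pairwise (· < ·) ∧ ∀ x : Int, x ∈ s ↔ x ∈ r

theorem pv_mem_insSU (host x : Int) (r : List Int) :
    x ∈ pvInsSU host r ↔ x = host ∨ x ∈ r := by
  induction r with
  | nil => simp [pvInsSU]
  | cons y ys ih =>
    unfold pvInsSU
    split_ifs with h1 h2
    · simp [List.mem_cons]
    · subst h2
      constructor
      · intro hx; right; exact hx
      · intro hx; rcases hx with rfl | hx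
        · exact List.mem_cons_self
        · exact hx
    · simp [List.mem_cons, ih]; tauto

theorem pv_pairwise_insSU (host : Int) (r : List Int) (h : r.Pairwise (· < ·)) :
    (pvInsSU host r).Pairwise (· < ·) := by
  induction r with
  | nil => simp [pvInsSU]
  | cons y ys ih =>
    rw [List.pairwise_cons] at h
    obtain ⟨hy, hys⟩ := h
    unfold pvInsSU
    split_ifs with h1 h2
    · exact List.pairwise_cons.2 ⟨by
        intro a ha
        rcases List.mem_cons.1 ha with rfl | ha'
        · exact h1
        · exact lt_trans h1 (hy a ha'), List.pairwise_cons.2 ⟨hy, hys⟩⟩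
    · exact List.pairwise_cons.2 ⟨hy, hys⟩
    · refine List.pairwise_cons.2 ⟨?_, ih hys⟩
      intro a ha
      rcases (pv_mem_insSU host a ys).1 ha with rfl | ha'
      · omega
      · exact hy a ha'

theorem pv_loop (l : List String) : ∀ (s : PySem.Set Int) (r : List Int),
    (∀ t ∈ l, pvGoodToken t = true) → pvInv s r →
    ∃ s' r', l.foldl pvStepA (some s) = some s' ∧ l.foldl pvStepB (some r) = some r' ∧ pvInv s' r' := by
  induction l with
  | nil => exact fun s r _ hinv => ⟨s, r, rfl, rfl, hinv⟩
  | cons t ts ih =>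
    intro s r hg hinv
    have hgt := hg t (by simp)
    unfold pvGoodToken at hgt
    cases hh : PySem.Int.ofStr? t with
    | none => rw [hh] at hgt; simp at hgt
    | some h =>
      rw [hh] at hgt
      have hb : 1 ≤ h ∧ h ≤ 254 := by simpa using hgt
      obtain ⟨hnd, hpw, hmem⟩ := hinv
      have stepA : pvStepA (some s) t = some (PySem.Set.add s h) := by
        simp [pvStepA, hh]; omega
      have stepB : pvStepB (some r) t = some (pvInsSU h r) := by
        simp [pvStepB, hh]; omega
      have hinv' : pvInv (PySem.Set.add s h) (pvInsSU h r) := by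
        refine ⟨PySem.Set.nodup_add s h hnd, pv_pairwise_insSU h r hpw, ?_⟩
        intro x
        rw [PySem.Set.mem_add, pv_mem_insSU, hmem]
        tauto
      have := ih (PySem.Set.add s h) (pvInsSU h r)
        (fun u hu => hg u (by simp [hu])) hinv'
      simpa [List.foldl_cons, stepA, stepB] using this

theorem pv_final (s : PySem.Set Int) (r : List Int) (hinv : pvInv s r) :
    PySem.List.sorted s (fun x => x) false = r := by
  obtain ⟨hnd, hpw, hmem⟩ := hinv
  apply PySem.List.sorted_eq_of_perm_of_pairwise_lt
  · rw [List.perm_ext_iff_of_nodup ((hpw.imp fun hlt => ne_of_lt hlt : List.Nodup r)) hnd]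
    intro x
    exact (hmem x).symm
  · exact hpw

theorem pv_init_inv : pvInv (PySem.Set.ofList [(1:Int)]) [(1:Int)] := by
  refine ⟨PySem.Set.nodup_ofList _, by simp, ?_⟩
  intro x
  simp [PySem.Set.mem_ofList]

-- ===== VERDICT (by name: the statement is the Claim_ definition above) =====
theorem parse_allowed_hosts_spec : Claim_equal_parse_allowed_hosts := by
  intro raw _ hpre
  unfold Spec_parse_allowed_hosts parse_allowed_hosts parse_allowed_hosts_alt
  by_cases hs : PySem.Str.strip raw = ""
  · simp [hs]
  · simp only [hs, if_false]
    obtain ⟨s', r', hA, hB, hinv⟩ :=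
      pv_loop (PySem.Str.split₀ (PySem.Str.strip raw)) (PySem.Set.ofList [(1:Int)])
        [(1:Int)] hpre pv_init_inv
    rw [hA, hB]
    simp [pv_final s' r' hinv]
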